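-- pv_equiv track=rewrite | github.com/NicoleSchelter/KIRO_GITTE | src/ui/chat_ui.py | _extract_design_characteristics
-- ===== SOURCE A (Python) =====
-- from typing import Any
--
-- def _extract_design_characteristics(design_input: str) -> dict[str, Any]:
--     """Extract embodiment characteristics from design input."""
--     # Simple keyword-based extraction (could be enhanced with NLP)
--     characteristics = {}
--
--     # Appearance keywords
--     if any(word in design_input.lower() for word in ["professional", "formal", "business"]):
--         characteristics["appearance_style"] = "professional"
--     elif any(word in design_input.lower() for word in ["friendly", "casual", "approachable"]):
--         characteristics["appearance_style"] = "friendly"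
--     elif any(word in design_input.lower() for word in ["creative", "artistic", "colorful"]):
--         characteristics["appearance_style"] = "creative"
--
--     # Personality keywords
--     if any(word in design_input.lower() for word in ["enthusiastic", "energetic", "excited"]):
--         characteristics["personality"] = "enthusiastic"
--     elif any(word in design_input.lower() for word in ["calm", "patient", "gentle"]):
--         characteristics["personality"] = "calm"
--     elif any(
--         word in design_input.lower() for word in ["encouraging", "supportive", "positive"]
--     ):
--         characteristics["personality"] = "encouraging"
--
--     return characteristics
-- ===== SOURCE B (Python) =====
-- def _extract_design_characteristics(design_input: str) -> dict:
--     """Two-stage extraction: first collect EVERY matching keyword as a hit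
--     (slot, rank, tag), then resolve each slot to the tag of its lowest-rank
--     hit.  Equivalent to A's first-match cascades because ranks follow A's
--     priority order and keywords of one tag group are contiguous."""
--     text = design_input.lower()
--     keywords = [
--         # (keyword, slot, tag, rank)  -- rank = priority position within the slot
--         ("professional", "appearance_style", "professional", 0),
--         ("formal", "appearance_style", "professional", 1),
--         ("business", "appearance_style", "professional", 2),
--         ("friendly", "appearance_style", "friendly", 3),
--         ("casual", "appearance_style", "friendly", 4),
--         ("approachable", "appearance_style", "friendly", 5),
--         ("creative", "appearance_style", "creative", 6),
--         ("artistic", "appearance_style", "creative", 7),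
--         ("colorful", "appearance_style", "creative", 8),
--         ("enthusiastic", "personality", "enthusiastic", 0),
--         ("energetic", "personality", "enthusiastic", 1),
--         ("excited", "personality", "enthusiastic", 2),
--         ("calm", "personality", "calm", 3),
--         ("patient", "personality", "calm", 4),
--         ("gentle", "personality", "calm", 5),
--         ("encouraging", "personality", "encouraging", 6),
--         ("supportive", "personality", "encouraging", 7),
--         ("positive", "personality", "encouraging", 8),
--     ]
--     hits = [(slot, rank, tag) for kw, slot, tag, rank in keywords if kw in text]
--     characteristics = {}
--     for slot in ("appearance_style", "personality"):
--         ranked = [(rank, tag) for s, rank, tag in hits if s == slot]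
--         if ranked:
--             characteristics[slot] = min(ranked)[1]
--     return characteristics
-- ===== Notes on version B (the rewrite author's own statement) =====
-- stated objective: alternative
-- what changed: Replaces A's short-circuiting if/elif cascades by a two-stage pipeline: one pass collects every matching keyword as a (slot, rank, tag) hit from a flat keyword table, then each slot is resolved to the tag of its minimum-rank hit via min(); correct because ranks encode A's priority order.
import Mathlib
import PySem

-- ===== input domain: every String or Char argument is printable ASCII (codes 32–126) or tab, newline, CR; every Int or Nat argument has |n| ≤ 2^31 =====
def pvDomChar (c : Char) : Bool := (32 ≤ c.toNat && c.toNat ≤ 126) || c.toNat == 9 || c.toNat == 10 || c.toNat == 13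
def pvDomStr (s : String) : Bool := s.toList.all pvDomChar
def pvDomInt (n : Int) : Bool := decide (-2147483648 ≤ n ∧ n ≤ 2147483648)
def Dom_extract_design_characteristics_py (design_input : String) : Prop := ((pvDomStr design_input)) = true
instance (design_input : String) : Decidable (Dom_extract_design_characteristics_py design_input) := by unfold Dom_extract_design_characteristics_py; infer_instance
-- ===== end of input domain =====

-- B replaces A's two if/elif cascades by a two-stage pipeline (collect all keyword hits, then resolve each slot by minimum rank); alternative algorithm, same cost.


-- ===== PORT A =====
-- literal port of A: two if/elif cascades, lower() recomputed in every test, dict built by insert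
def extract_design_characteristics_py (design_input : String) : List (String × String) :=
  let characteristics : PySem.Dict String String := PySem.Dict.empty
  let characteristics :=
    if ["professional", "formal", "business"].any
        (fun word => PySem.Str.isIn word (PySem.Str.lower design_input)) then
      characteristics.insert "appearance_style" "professional"
    else if ["friendly", "casual", "approachable"].any
        (fun word => PySem.Str.isIn word (PySem.Str.lower design_input)) then
      characteristics.insert "appearance_style" "friendly"
    else if ["creative", "artistic", "colorful"].any
        (fun word => PySem.Str.isIn word (PySem.Str.lower design_input)) then
      characteristics.insert "appearance_style" "creative"
    else characteristics
  let characteristics :=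
    if ["enthusiastic", "energetic", "excited"].any
        (fun word => PySem.Str.isIn word (PySem.Str.lower design_input)) then
      characteristics.insert "personality" "enthusiastic"
    else if ["calm", "patient", "gentle"].any
        (fun word => PySem.Str.isIn word (PySem.Str.lower design_input)) then
      characteristics.insert "personality" "calm"
    else if ["encouraging", "supportive", "positive"].any
        (fun word => PySem.Str.isIn word (PySem.Str.lower design_input)) then
      characteristics.insert "personality" "encouraging"
    else characteristics
  characteristics.items

-- ===== PORT B =====
-- B: flat keyword table (keyword, slot, tag, rank)
def pvKeywords : List (String × String × String × Int) :=
  [("professional", "appearance_style", "professional", 0),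
   ("formal", "appearance_style", "professional", 1),
   ("business", "appearance_style", "professional", 2),
   ("friendly", "appearance_style", "friendly", 3),
   ("casual", "appearance_style", "friendly", 4),
   ("approachable", "appearance_style", "friendly", 5),
   ("creative", "appearance_style", "creative", 6),
   ("artistic", "appearance_style", "creative", 7),
   ("colorful", "appearance_style", "creative", 8),
   ("enthusiastic", "personality", "enthusiastic", 0),
   ("energetic", "personality", "enthusiastic", 1),
   ("excited", "personality", "enthusiastic", 2),
   ("calm", "personality", "calm", 3),
   ("patient", "personality", "calm", 4),
   ("gentle", "personality", "calm", 5),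
   ("encouraging", "personality", "encouraging", 6),
   ("supportive", "personality", "encouraging", 7),
   ("positive", "personality", "encouraging", 8)]

-- B: stage 1 collects every matching keyword as a hit (slot, rank, tag); stage 2 resolves each slot by min over (rank, tag)
def extract_design_characteristics_py_alt (design_input : String) : List (String × String) :=
  let text := PySem.Str.lower design_input
  let hits := (pvKeywords.filter (fun e => PySem.Str.isIn e.1 text)).map
    (fun e => (e.2.1, e.2.2.2, e.2.2.1))
  let characteristics := ["appearance_style", "personality"].foldl
    (fun (d : PySem.Dict String String) slot =>
      let ranked := (hits.filter (fun h => h.1 == slot)).map (fun h => (h.2.1, h.2.2))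
      match PySem.List.min2? ranked (fun r => r.1) (fun r => r.2) with
      | some m => d.insert slot m.2
      | none => d)
    PySem.Dict.empty
  characteristics.items

-- ===== PRECONDITION & SPEC =====
def Spec_extract_design_characteristics_py (design_input : String) (out : List (String × String)) : Prop := out = extract_design_characteristics_py_alt design_input
instance (design_input : String) (out : List (String × String)) : Decidable (Spec_extract_design_characteristics_py design_input out) := by unfold Spec_extract_design_characteristics_py; infer_instance

-- ===== CLAIM =====
def Claim_equal_extract_design_characteristics_py : Prop := ∀ (design_input : String), Dom_extract_design_characteristics_py design_input → Spec_extract_design_characteristics_py design_input (extract_design_characteristics_py design_input)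

-- ===== LEMMAS AND PROOFS =====
def condSing {α : Type} (b : Bool) (x : α) : List α := if b then [x] else []

def optEntry (k : String) (o : Option String) : List (String × String) :=
  match o with | some v => [(k, v)] | none => []

def chainA (b1 b2 b3 b4 b5 b6 b7 b8 b9 : Bool) (t1 t2 t3 : String) : Option String :=
  if b1 || (b2 || (b3 || false)) then some t1
  else if b4 || (b5 || (b6 || false)) then some t2
  else if b7 || (b8 || (b9 || false)) then some t3
  else none

lemma filter_cons_append {α : Type} (p : α → Bool) (a : α) (l : List α) :
    List.filter p (a :: l) = condSing (p a) a ++ List.filter p l := by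
  by_cases h : p a <;> simp [condSing, h]

lemma map_condSing {α β : Type} (f : α → β) (b : Bool) (x : α) :
    List.map f (condSing b x) = condSing b (f x) := by
  cases b <;> simp [condSing]

lemma filter_condSing {α : Type} (p : α → Bool) (b : Bool) (x : α) :
    List.filter p (condSing b x) = if p x then condSing b x else [] := by
  cases b <;> by_cases h : p x <;> simp [condSing, h]

set_option maxHeartbeats 4000000 in
lemma minApp (b1 b2 b3 b4 b5 b6 b7 b8 b9 : Bool) :
    Option.map Prod.snd (PySem.List.min2?
      (condSing b1 ((0:Int),"professional") ++ (condSing b2 (1,"professional") ++ (condSing b3 (2,"professional") ++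
       (condSing b4 (3,"friendly") ++ (condSing b5 (4,"friendly") ++ (condSing b6 (5,"friendly") ++
       (condSing b7 (6,"creative") ++ (condSing b8 (7,"creative") ++ condSing b9 (8,"creative")))))))))
      (fun r => r.1) (fun r => r.2))
    = chainA b1 b2 b3 b4 b5 b6 b7 b8 b9 "professional" "friendly" "creative" := by
  revert b1 b2 b3 b4 b5 b6 b7 b8 b9; decide

set_option maxHeartbeats 4000000 in
lemma minPers (b1 b2 b3 b4 b5 b6 b7 b8 b9 : Bool) :
    Option.map Prod.snd (PySem.List.min2?
      (condSing b1 ((0:Int),"enthusiastic") ++ (condSing b2 (1,"enthusiastic") ++ (condSing b3 (2,"enthusiastic") ++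
       (condSing b4 (3,"calm") ++ (condSing b5 (4,"calm") ++ (condSing b6 (5,"calm") ++
       (condSing b7 (6,"encouraging") ++ (condSing b8 (7,"encouraging") ++ condSing b9 (8,"encouraging")))))))))
      (fun r => r.1) (fun r => r.2))
    = chainA b1 b2 b3 b4 b5 b6 b7 b8 b9 "enthusiastic" "calm" "encouraging" := by
  revert b1 b2 b3 b4 b5 b6 b7 b8 b9; decide

lemma A_split (s : String) :
    extract_design_characteristics_py s =
      optEntry "appearance_style"
        (chainA (PySem.Str.isIn "professional" (PySem.Str.lower s)) (PySem.Str.isIn "formal" (PySem.Str.lower s))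
          (PySem.Str.isIn "business" (PySem.Str.lower s)) (PySem.Str.isIn "friendly" (PySem.Str.lower s))
          (PySem.Str.isIn "casual" (PySem.Str.lower s)) (PySem.Str.isIn "approachable" (PySem.Str.lower s))
          (PySem.Str.isIn "creative" (PySem.Str.lower s)) (PySem.Str.isIn "artistic" (PySem.Str.lower s))
          (PySem.Str.isIn "colorful" (PySem.Str.lower s)) "professional" "friendly" "creative")
      ++ optEntry "personality"
        (chainA (PySem.Str.isIn "enthusiastic" (PySem.Str.lower s)) (PySem.Str.isIn "energetic" (PySem.Str.lower s))
          (PySem.Str.isIn "excited" (PySem.Str.lower s)) (PySem.Str.isIn "calm" (PySem.Str.lower s))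
          (PySem.Str.isIn "patient" (PySem.Str.lower s)) (PySem.Str.isIn "gentle" (PySem.Str.lower s))
          (PySem.Str.isIn "encouraging" (PySem.Str.lower s)) (PySem.Str.isIn "supportive" (PySem.Str.lower s))
          (PySem.Str.isIn "positive" (PySem.Str.lower s)) "enthusiastic" "calm" "encouraging") := by
  unfold extract_design_characteristics_py chainA
  simp only [List.any_cons, List.any_nil, Bool.or_false]
  split_ifs <;> rfl

lemma B_split (s : String) :
    extract_design_characteristics_py_alt s =
      optEntry "appearance_style"
        (chainA (PySem.Str.isIn "professional" (PySem.Str.lower s)) (PySem.Str.isIn "formal" (PySem.Str.lower s))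
          (PySem.Str.isIn "business" (PySem.Str.lower s)) (PySem.Str.isIn "friendly" (PySem.Str.lower s))
          (PySem.Str.isIn "casual" (PySem.Str.lower s)) (PySem.Str.isIn "approachable" (PySem.Str.lower s))
          (PySem.Str.isIn "creative" (PySem.Str.lower s)) (PySem.Str.isIn "artistic" (PySem.Str.lower s))
          (PySem.Str.isIn "colorful" (PySem.Str.lower s)) "professional" "friendly" "creative")
      ++ optEntry "personality"
        (chainA (PySem.Str.isIn "enthusiastic" (PySem.Str.lower s)) (PySem.Str.isIn "energetic" (PySem.Str.lower s))
          (PySem.Str.isIn "excited" (PySem.Str.lower s)) (PySem.Str.isIn "calm" (PySem.Str.lower s))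
          (PySem.Str.isIn "patient" (PySem.Str.lower s)) (PySem.Str.isIn "gentle" (PySem.Str.lower s))
          (PySem.Str.isIn "encouraging" (PySem.Str.lower s)) (PySem.Str.isIn "supportive" (PySem.Str.lower s))
          (PySem.Str.isIn "positive" (PySem.Str.lower s)) "enthusiastic" "calm" "encouraging") := by
  unfold extract_design_characteristics_py_alt pvKeywords
  simp only [filter_cons_append, List.filter_nil, List.append_nil, List.map_append, map_condSing,
    List.filter_append, filter_condSing, List.foldl_cons, List.foldl_nil,
    beq_iff_eq, String.reduceEq, reduceIte, List.map_nil, List.nil_append, List.append_nil]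
  rw [← minApp, ← minPers]
  cases PySem.List.min2?
      (condSing (PySem.Str.isIn "professional" (PySem.Str.lower s)) ((0:Int),"professional") ++ (condSing (PySem.Str.isIn "formal" (PySem.Str.lower s)) (1,"professional") ++ (condSing (PySem.Str.isIn "business" (PySem.Str.lower s)) (2,"professional") ++
       (condSing (PySem.Str.isIn "friendly" (PySem.Str.lower s)) (3,"friendly") ++ (condSing (PySem.Str.isIn "casual" (PySem.Str.lower s)) (4,"friendly") ++ (condSing (PySem.Str.isIn "approachable" (PySem.Str.lower s)) (5,"friendly") ++
       (condSing (PySem.Str.isIn "creative" (PySem.Str.lower s)) (6,"creative") ++ (condSing (PySem.Str.isIn "artistic" (PySem.Str.lower s)) (7,"creative") ++ condSing (PySem.Str.isIn "colorful" (PySem.Str.lower s)) (8,"creative")))))))))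
      (fun r => r.1) (fun r => r.2) <;>
  cases PySem.List.min2?
      (condSing (PySem.Str.isIn "enthusiastic" (PySem.Str.lower s)) ((0:Int),"enthusiastic") ++ (condSing (PySem.Str.isIn "energetic" (PySem.Str.lower s)) (1,"enthusiastic") ++ (condSing (PySem.Str.isIn "excited" (PySem.Str.lower s)) (2,"enthusiastic") ++
       (condSing (PySem.Str.isIn "calm" (PySem.Str.lower s)) (3,"calm") ++ (condSing (PySem.Str.isIn "patient" (PySem.Str.lower s)) (4,"calm") ++ (condSing (PySem.Str.isIn "gentle" (PySem.Str.lower s)) (5,"calm") ++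
       (condSing (PySem.Str.isIn "encouraging" (PySem.Str.lower s)) (6,"encouraging") ++ (condSing (PySem.Str.isIn "supportive" (PySem.Str.lower s)) (7,"encouraging") ++ condSing (PySem.Str.isIn "positive" (PySem.Str.lower s)) (8,"encouraging")))))))))
      (fun r => r.1) (fun r => r.2) <;>
  rfl

-- ===== VERDICT =====
theorem extract_design_characteristics_py_spec : Claim_equal_extract_design_characteristics_py := by
  intro s _
  unfold Spec_extract_design_characteristics_py
  rw [A_split, B_split]
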